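-- pv_equiv track=rewrite | github.com/jplfaria/ModelSEEDagent | src/tools/biochem/standalone_resolver.py | _clean_id
-- ===== SOURCE A (Python) =====
-- def _clean_id(entity_id: str, remove_compartments: bool = True) -> str:
--     """Clean ID by removing compartments if requested"""
--     if not remove_compartments:
--         return entity_id
--
--     # Remove common compartment suffixes
--     compartments = ["_c", "_e", "_p", "_m", "_x", "_r", "_v", "_g", "_h", "_n"]
--     for comp in compartments:
--         if entity_id.endswith(comp):
--             return entity_id[: -len(comp)]
--
--     return entity_id
-- ===== SOURCE B (Python) =====
-- _COMPARTMENT_LETTERS = frozenset("cepmxrvghn")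
--
--
-- def _clean_id(entity_id: str, remove_compartments: bool = True) -> str:
--     """Clean ID by removing compartments if requested"""
--     if not remove_compartments:
--         return entity_id
--
--     if len(entity_id) >= 2 and entity_id[-2] == "_" and entity_id[-1] in _COMPARTMENT_LETTERS:
--         return entity_id[:-2]
--     return entity_id
-- ===== Notes on version B (the rewrite author's own statement) =====
-- stated objective: idiomatic
-- what changed: Replaces the ten-suffix endswith loop with one positional check: the last-but-one character an underscore and the last character in a set of the ten compartment letters, then a single slice dropping two characters.
import Mathlib
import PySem

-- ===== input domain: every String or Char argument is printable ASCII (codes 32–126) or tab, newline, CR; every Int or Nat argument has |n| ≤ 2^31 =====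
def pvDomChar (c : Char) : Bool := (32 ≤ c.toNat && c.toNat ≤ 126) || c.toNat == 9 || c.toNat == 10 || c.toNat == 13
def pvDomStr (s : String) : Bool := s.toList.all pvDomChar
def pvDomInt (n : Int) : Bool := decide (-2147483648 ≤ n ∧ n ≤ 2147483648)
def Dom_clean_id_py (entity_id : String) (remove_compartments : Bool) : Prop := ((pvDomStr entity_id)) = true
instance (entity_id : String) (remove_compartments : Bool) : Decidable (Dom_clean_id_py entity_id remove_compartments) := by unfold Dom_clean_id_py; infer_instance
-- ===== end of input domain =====

-- B replaces A's ten-suffix endswith loop by one positional check of the last two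
-- characters (is '_' followed by a compartment letter) and a single [:-2] slice; idiomatic, same cost.

-- ===== PORT A =====
-- the 'for comp in compartments' loop: first matching suffix wins
def cleanA_loop (entity_id : String) : List String → String
  | [] => entity_id
  | comp :: rest =>
    if PySem.Str.endswith entity_id comp then
      PySem.Str.slice entity_id none (some (-(PySem.Str.len comp : Int)))
    else cleanA_loop entity_id rest

def clean_id_py (entity_id : String) (remove_compartments : Bool) : String :=
  if !remove_compartments then entity_id
  else
    cleanA_loop entity_id ["_c", "_e", "_p", "_m", "_x", "_r", "_v", "_g", "_h", "_n"]

-- ===== PORT B =====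
-- the frozenset of the ten compartment letters
def pvCompLetters : List Char := ['c', 'e', 'p', 'm', 'x', 'r', 'v', 'g', 'h', 'n']

def clean_id_py_alt (entity_id : String) (remove_compartments : Bool) : String :=
  if !remove_compartments then entity_id
  else if 2 ≤ PySem.Str.len entity_id ∧
          PySem.Str.pyGet? entity_id (-2) = some '_' ∧
          (PySem.Str.pyGet? entity_id (-1)).any (pvCompLetters.contains ·) then
    PySem.Str.slice entity_id none (some (-2))
  else entity_id

-- ===== PRECONDITION & SPEC =====
def Spec_clean_id_py (entity_id : String) (remove_compartments : Bool) (out : String) : Prop := out = clean_id_py_alt entity_id remove_compartments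
instance (entity_id : String) (remove_compartments : Bool) (out : String) : Decidable (Spec_clean_id_py entity_id remove_compartments out) := by unfold Spec_clean_id_py; infer_instance

-- ===== CLAIM (what is proved, stated in full; the proofs are below) =====
def Claim_equal_clean_id_py : Prop := ∀ (entity_id : String) (remove_compartments : Bool), Dom_clean_id_py entity_id remove_compartments → Spec_clean_id_py entity_id remove_compartments (clean_id_py entity_id remove_compartments)

-- ===== LEMMAS AND PROOFS =====

lemma suffix_pair_iff (t : List Char) (a b x y : Char) : [x, y] <:+ (t ++ [a, b]) ↔ x = a ∧ y = b := by
  constructor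
  · rintro ⟨u, hu⟩
    have := List.append_inj' hu rfl
    simp at this; tauto
  · rintro ⟨rfl, rfl⟩; exact ⟨t, rfl⟩

-- a two-character suffix test is exactly B's positional check on the last two characters
lemma endswith_pair (cs : List Char) (x y : Char) :
    PySem.Chars.endswith cs [x, y] = true ↔
      2 ≤ cs.length ∧ PySem.List.pyGet? cs (-2) = some x ∧ PySem.List.pyGet? cs (-1) = some y := by
  rw [PySem.Chars.endswith_iff]
  rcases h : cs.reverse with _ | ⟨b, rest⟩
  · have : cs = [] := by simpa using congrArg List.reverse h
    subst this; simp
  · rcases rest with _ | ⟨a, t⟩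
    · have : cs = [b] := by simpa using congrArg List.reverse h
      subst this
      simp [List.suffix_cons_iff]
    · have hcs : cs = t.reverse ++ [a, b] := by
        have := congrArg List.reverse h
        simpa using this
      subst hcs
      rw [suffix_pair_iff]
      have h2 : PySem.List.pyGet? (t.reverse ++ [a, b]) (-1) = some b := by
        rw [show t.reverse ++ [a, b] = (t.reverse ++ [a]) ++ [b] by simp]
        exact PySem.List.pyGet?_neg_one_append_singleton _ _
      have h1 : PySem.List.pyGet? (t.reverse ++ [a, b]) (-2) = some a := by
        rw [PySem.List.pyGet?_neg_ofNat _ 2 (by omega) (by simp)]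
        simp
      simp [h1, h2]
      constructor
      · rintro ⟨rfl, rfl⟩; simp
      · rintro ⟨h1, h2⟩; exact ⟨h1.symm, h2.symm⟩

-- string-level form for a literal two-character pattern
lemma endswith_pair_str (s : String) (x y : Char) (p : String) (hp : p.toList = [x, y]) :
    PySem.Str.endswith s p = true ↔
      2 ≤ PySem.Str.len s ∧ PySem.Str.pyGet? s (-2) = some x ∧ PySem.Str.pyGet? s (-1) = some y := by
  have := endswith_pair s.toList x y
  simpa [PySem.Str.endswith, PySem.Str.len, PySem.Str.pyGet?, hp, PySem.Chars.len_eq] using this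

-- when a suffix matches, A's return equals B's then-branch
lemma match_case (s : String) (c : Char) (p : String) (hp : p.toList = ['_', c])
    (hc : pvCompLetters.contains c = true) (h : PySem.Str.endswith s p = true) :
    PySem.Str.slice s none (some (-(PySem.Str.len p : Int))) =
      (if 2 ≤ PySem.Str.len s ∧ PySem.Str.pyGet? s (-2) = some '_' ∧
            (PySem.Str.pyGet? s (-1)).any (pvCompLetters.contains ·) then
        PySem.Str.slice s none (some (-2))
      else s) := by
  rcases (endswith_pair_str s '_' c p hp).mp h with ⟨hl, hm, he⟩
  rw [if_pos ⟨hl, hm, by rw [he]; simpa using hc⟩]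
  have hlen : PySem.Str.len p = 2 := by
    simp [PySem.Str.len, hp]
  rw [hlen]

theorem clean_id_py_spec : Claim_equal_clean_id_py := by
  intro s rc _
  unfold Spec_clean_id_py clean_id_py clean_id_py_alt
  cases rc with
  | false => simp
  | true =>
    simp only [Bool.not_true, Bool.false_eq_true, if_false, cleanA_loop]
    by_cases h1 : PySem.Str.endswith s "_c" = true
    · rw [if_pos h1]; exact match_case s 'c' "_c" (by decide) (by decide) h1
    rw [if_neg h1]
    by_cases h2 : PySem.Str.endswith s "_e" = true
    · rw [if_pos h2]; exact match_case s 'e' "_e" (by decide) (by decide) h2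
    rw [if_neg h2]
    by_cases h3 : PySem.Str.endswith s "_p" = true
    · rw [if_pos h3]; exact match_case s 'p' "_p" (by decide) (by decide) h3
    rw [if_neg h3]
    by_cases h4 : PySem.Str.endswith s "_m" = true
    · rw [if_pos h4]; exact match_case s 'm' "_m" (by decide) (by decide) h4
    rw [if_neg h4]
    by_cases h5 : PySem.Str.endswith s "_x" = true
    · rw [if_pos h5]; exact match_case s 'x' "_x" (by decide) (by decide) h5
    rw [if_neg h5]
    by_cases h6 : PySem.Str.endswith s "_r" = true
    · rw [if_pos h6]; exact match_case s 'r' "_r" (by decide) (by decide) h6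
    rw [if_neg h6]
    by_cases h7 : PySem.Str.endswith s "_v" = true
    · rw [if_pos h7]; exact match_case s 'v' "_v" (by decide) (by decide) h7
    rw [if_neg h7]
    by_cases h8 : PySem.Str.endswith s "_g" = true
    · rw [if_pos h8]; exact match_case s 'g' "_g" (by decide) (by decide) h8
    rw [if_neg h8]
    by_cases h9 : PySem.Str.endswith s "_h" = true
    · rw [if_pos h9]; exact match_case s 'h' "_h" (by decide) (by decide) h9
    rw [if_neg h9]
    by_cases h10 : PySem.Str.endswith s "_n" = true
    · rw [if_pos h10]; exact match_case s 'n' "_n" (by decide) (by decide) h10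
    rw [if_neg h10]
    by_cases hB : 2 ≤ PySem.Str.len s ∧ PySem.Str.pyGet? s (-2) = some '_' ∧
    (PySem.Str.pyGet? s (-1)).any (pvCompLetters.contains ·) = true
    · exfalso
      rcases hB with ⟨hl, hm, hany⟩
      rcases ha : PySem.Str.pyGet? s (-1) with _ | c
      · rw [ha] at hany; simp at hany
      have he := ha
      rw [ha] at hany
      simp only [Option.any_some] at hany
      simp only [pvCompLetters, List.contains_eq_mem, List.mem_cons, List.not_mem_nil, or_false,
      decide_eq_true_eq] at hany
      rcases hany with rfl | rfl | rfl | rfl | rfl | rfl | rfl | rfl | rfl | rfl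
      · exact h1 ((endswith_pair_str s '_' 'c' "_c" (by decide)).mpr ⟨hl, hm, he⟩)
      · exact h2 ((endswith_pair_str s '_' 'e' "_e" (by decide)).mpr ⟨hl, hm, he⟩)
      · exact h3 ((endswith_pair_str s '_' 'p' "_p" (by decide)).mpr ⟨hl, hm, he⟩)
      · exact h4 ((endswith_pair_str s '_' 'm' "_m" (by decide)).mpr ⟨hl, hm, he⟩)
      · exact h5 ((endswith_pair_str s '_' 'x' "_x" (by decide)).mpr ⟨hl, hm, he⟩)
      · exact h6 ((endswith_pair_str s '_' 'r' "_r" (by decide)).mpr ⟨hl, hm, he⟩)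
      · exact h7 ((endswith_pair_str s '_' 'v' "_v" (by decide)).mpr ⟨hl, hm, he⟩)
      · exact h8 ((endswith_pair_str s '_' 'g' "_g" (by decide)).mpr ⟨hl, hm, he⟩)
      · exact h9 ((endswith_pair_str s '_' 'h' "_h" (by decide)).mpr ⟨hl, hm, he⟩)
      · exact h10 ((endswith_pair_str s '_' 'n' "_n" (by decide)).mpr ⟨hl, hm, he⟩)
    · rw [if_neg hB]
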